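-- pv_equiv track=rewrite | github.com/dps96744/tiktokshop | TikTok Shop_cohortanalysisai.py | advanced_bfs_with_random_cutoffs
-- ===== SOURCE A (Python) =====
-- from typing import Dict, Any, List, Optional
--
-- def advanced_bfs_with_random_cutoffs(graph: Dict[Any, List[Any]], start: Any, cutoff: int) -> List[Any]:
--     visited = []
--     queue = [(start, 0)]
--     while queue:
--         node, depth = queue.pop(0)
--         if node not in visited:
--             visited.append(node)
--             if depth < cutoff:
--                 neighbors = graph.get(node, [])
--                 for n in neighbors:
--                     if n not in visited:
--                         queue.append((n, depth + 1))
--     return visited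
-- ===== SOURCE B (Python) =====
-- def advanced_bfs_with_random_cutoffs(graph, start, cutoff):
--     visited = []
--     frontier = [start]
--     depth = 0
--     while frontier:
--         next_frontier = []
--         for node in frontier:
--             if node not in visited:
--                 visited.append(node)
--                 if depth < cutoff:
--                     for n in graph.get(node, []):
--                         if n not in visited:
--                             next_frontier.append(n)
--         frontier = next_frontier
--         depth += 1
--     return visited
-- ===== Notes on version B (the rewrite author's own statement) =====
-- stated objective: alternative
-- what changed: Replaces the single FIFO queue of (node, depth) pairs by level-synchronous BFS: a per-level frontier list and one integer depth counter, building each next frontier in an inner loop instead of popping tagged pairs from a shared queue.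
import Mathlib
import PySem

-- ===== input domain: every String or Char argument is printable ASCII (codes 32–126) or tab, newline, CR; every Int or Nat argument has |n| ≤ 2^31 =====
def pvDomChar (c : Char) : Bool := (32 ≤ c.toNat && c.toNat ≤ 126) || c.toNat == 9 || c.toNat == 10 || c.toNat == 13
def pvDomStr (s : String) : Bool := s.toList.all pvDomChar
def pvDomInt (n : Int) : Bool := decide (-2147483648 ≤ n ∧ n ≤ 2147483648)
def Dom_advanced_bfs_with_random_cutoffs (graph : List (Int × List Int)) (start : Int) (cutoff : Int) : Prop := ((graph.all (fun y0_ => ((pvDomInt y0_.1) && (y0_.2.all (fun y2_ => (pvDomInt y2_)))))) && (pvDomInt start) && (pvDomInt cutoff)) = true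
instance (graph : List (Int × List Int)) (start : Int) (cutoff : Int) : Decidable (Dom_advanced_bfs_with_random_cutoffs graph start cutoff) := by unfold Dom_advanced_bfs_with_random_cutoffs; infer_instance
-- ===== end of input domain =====

-- B replaces A's single FIFO queue of (node, depth) pairs by level-synchronous BFS
-- (per-level frontier list + one depth counter); same return value, alternative decomposition.

-- ===== PORT A =====
-- graph.get(node, []) on the association-list dict
def bfsNbrs (graph : List (Int × List Int)) (node : Int) : List Int :=
  (PySem.Dict.mk graph).getD node []

-- all node values occurring as neighbors (used only for the termination measure)
def bfsUniv (graph : List (Int × List Int)) : List Int :=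
  graph.flatMap (·.2)

lemma bfsNbrs_subset_univ (graph : List (Int × List Int)) (node : Int) :
    ∀ x ∈ bfsNbrs graph node, x ∈ bfsUniv graph := by
  induction graph with
  | nil => intro x hx; simp [bfsNbrs, PySem.Dict.getD, PySem.Dict.get?] at hx
  | cons p t ih =>
    intro x hx
    obtain ⟨k, v⟩ := p
    rw [bfsNbrs, PySem.Dict.getD_eq_get?_getD, PySem.Dict.get?_mk_cons] at hx
    by_cases h : k == node
    · simp [h] at hx
      simp [bfsUniv]
      exact Or.inl hx
    · simp [h] at hx
      have := ih x (by rw [bfsNbrs, PySem.Dict.getD_eq_get?_getD]; exact hx)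
      simp [bfsUniv] at this ⊢
      exact Or.inr this

-- termination measure for A's while-loop
def bfsMA (graph : List (Int × List Int)) (visited : List Int) (queue : List (Int × Int)) : Nat :=
  (((queue.map (·.1)) ++ bfsUniv graph).toFinset \ visited.toFinset).card

lemma pvLexHelper {a a' b b' : Nat} (h1 : a' ≤ a) (h2 : b' < b) :
    Prod.Lex (· < ·) (· < ·) (a', b') (a, b) := by
  rcases lt_or_eq_of_le h1 with h | h
  · exact Prod.Lex.left _ _ h
  · subst h; exact Prod.Lex.right _ h2

lemma bfsMA_rest (graph : List (Int × List Int)) (visited : List Int)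
    (p : Int × Int) (rest : List (Int × Int)) :
    bfsMA graph visited rest ≤ bfsMA graph visited (p :: rest) := by
  apply Finset.card_le_card
  intro x hx
  simp only [Finset.mem_sdiff, List.mem_toFinset, List.mem_append, List.mem_map,
    List.mem_cons] at hx ⊢
  obtain ⟨hin, hnv⟩ := hx
  refine ⟨?_, hnv⟩
  rcases hin with ⟨q, hq, hq2⟩ | h
  · exact Or.inl ⟨q, Or.inr hq, hq2⟩
  · exact Or.inr h

lemma bfsMA_visit (graph : List (Int × List Int)) (visited : List Int)
    (node : Int) (depth : Int) (rest new : List (Int × Int))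
    (hnew : ∀ q ∈ new, q.1 ∈ bfsUniv graph) (hnode : node ∉ visited) :
    bfsMA graph (visited ++ [node]) (rest ++ new) < bfsMA graph visited ((node, depth) :: rest) := by
  apply Finset.card_lt_card
  rw [Finset.ssubset_def]
  constructor
  · intro x hx
    simp only [Finset.mem_sdiff, List.mem_toFinset, List.mem_append, List.mem_map,
      List.mem_cons] at hx ⊢
    obtain ⟨hin, hnv⟩ := hx
    refine ⟨?_, fun h => hnv (Or.inl h)⟩
    rcases hin with ⟨q, hq, hq2⟩ | h
    · rcases hq with h2 | h2
      · exact Or.inl ⟨q, Or.inr h2, hq2⟩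
      · exact Or.inr (hq2 ▸ hnew q h2)
    · exact Or.inr h
  · intro hsub
    have hmem : node ∈ ((((node, depth) :: rest).map (·.1)) ++ bfsUniv graph).toFinset \ visited.toFinset := by
      simp only [Finset.mem_sdiff, List.mem_toFinset, List.mem_append, List.mem_map,
        List.mem_cons]
      exact ⟨Or.inl ⟨(node, depth), Or.inl rfl, rfl⟩, hnode⟩
    have h2 := hsub hmem
    simp at h2

def bfsLoopA (graph : List (Int × List Int)) (cutoff : Int)
    (visited : List Int) (queue : List (Int × Int)) : List Int :=
  match queue with
  | [] => visited
  | (node, depth) :: rest =>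
    if node ∉ visited then
      if depth < cutoff then
        bfsLoopA graph cutoff (visited ++ [node])
          (rest ++ ((bfsNbrs graph node).filter (fun n => n ∉ visited ++ [node])).map (fun n => (n, depth + 1)))
      else
        bfsLoopA graph cutoff (visited ++ [node]) rest
    else
      bfsLoopA graph cutoff visited rest
termination_by (bfsMA graph visited queue, queue.length)
decreasing_by
  · refine Prod.Lex.left _ _ (bfsMA_visit graph visited node depth rest _ ?_ ‹node ∉ visited›)
    intro q hq
    simp only [List.mem_map] at hq
    obtain ⟨b, hb, rfl⟩ := hq
    exact bfsNbrs_subset_univ graph node b (List.mem_of_mem_filter hb)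
  · have := bfsMA_visit graph visited node depth rest [] (by simp) ‹node ∉ visited›
    simp only [List.append_nil] at this
    exact Prod.Lex.left _ _ this
  · exact pvLexHelper (bfsMA_rest graph visited (node, depth) rest) (by simp)

def advanced_bfs_with_random_cutoffs (graph : List (Int × List Int)) (start : Int) (cutoff : Int) : List Int :=
  bfsLoopA graph cutoff [] [(start, 0)]

-- ===== PORT B =====
-- the inner 'for node in frontier' loop of B: returns (visited, next_frontier)
def bfsInner (graph : List (Int × List Int)) (cutoff depth : Int)
    (visited next_frontier : List Int) (frontier : List Int) : List Int × List Int :=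
  match frontier with
  | [] => (visited, next_frontier)
  | node :: rest =>
    if node ∉ visited then
      if depth < cutoff then
        bfsInner graph cutoff depth (visited ++ [node])
          (next_frontier ++ (bfsNbrs graph node).filter (fun n => n ∉ visited ++ [node])) rest
      else
        bfsInner graph cutoff depth (visited ++ [node]) next_frontier rest
    else
      bfsInner graph cutoff depth visited next_frontier rest

lemma bfsInner_visited_subset (graph : List (Int × List Int)) (cutoff depth : Int) :
    ∀ frontier visited next_frontier, ∀ x ∈ visited,
      x ∈ (bfsInner graph cutoff depth visited next_frontier frontier).1 := by
  intro frontier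
  induction frontier with
  | nil => intro v n x hx; simpa [bfsInner] using hx
  | cons node rest ih =>
    intro v n x hx
    rw [bfsInner]
    by_cases h1 : node ∉ v
    · rw [if_pos h1]
      by_cases h2 : depth < cutoff
      · rw [if_pos h2]; exact ih _ _ x (List.mem_append_left _ hx)
      · rw [if_neg h2]; exact ih _ _ x (List.mem_append_left _ hx)
    · rw [if_neg h1]; exact ih _ _ x hx

lemma bfsInner_next_subset (graph : List (Int × List Int)) (cutoff depth : Int) :
    ∀ frontier visited next_frontier, ∀ x ∈ (bfsInner graph cutoff depth visited next_frontier frontier).2,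
      x ∈ next_frontier ∨ x ∈ bfsUniv graph := by
  intro frontier
  induction frontier with
  | nil => intro v n x hx; simp only [bfsInner] at hx; exact Or.inl hx
  | cons node rest ih =>
    intro v n x hx
    rw [bfsInner] at hx
    by_cases h1 : node ∉ v
    · rw [if_pos h1] at hx
      by_cases h2 : depth < cutoff
      · rw [if_pos h2] at hx
        rcases ih _ _ x hx with h | h
        · rcases List.mem_append.mp h with h | h
          · exact Or.inl h
          · exact Or.inr (bfsNbrs_subset_univ graph node x (List.mem_of_mem_filter h))
        · exact Or.inr h
      · rw [if_neg h2] at hx; exact ih _ _ x hx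
    · rw [if_neg h1] at hx; exact ih _ _ x hx

lemma bfsInner_eq_or_visit (graph : List (Int × List Int)) (cutoff depth : Int) :
    ∀ frontier visited next_frontier,
      bfsInner graph cutoff depth visited next_frontier frontier = (visited, next_frontier) ∨
      ∃ x ∈ frontier, x ∉ visited ∧ x ∈ (bfsInner graph cutoff depth visited next_frontier frontier).1 := by
  intro frontier
  induction frontier with
  | nil => intro v n; exact Or.inl rfl
  | cons node rest ih =>
    intro v n
    by_cases h : node ∈ v
    · rcases ih v n with h2 | ⟨x, hx, hxv, hxr⟩
      · left; rw [bfsInner]; simpa [h] using h2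
      · right; exact ⟨x, List.mem_cons_of_mem _ hx, hxv, by rw [bfsInner]; simpa [h] using hxr⟩
    · right
      refine ⟨node, List.mem_cons_self .., h, ?_⟩
      rw [bfsInner, if_pos h]
      by_cases h2 : depth < cutoff
      · rw [if_pos h2]
        exact bfsInner_visited_subset graph cutoff depth rest _ _ node (List.mem_append_right _ (List.mem_singleton.mpr rfl))
      · rw [if_neg h2]
        exact bfsInner_visited_subset graph cutoff depth rest _ _ node (List.mem_append_right _ (List.mem_singleton.mpr rfl))

def bfsMB (graph : List (Int × List Int)) (visited frontier : List Int) : Nat :=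
  ((frontier ++ bfsUniv graph).toFinset \ visited.toFinset).card

lemma bfsMB_step (graph : List (Int × List Int)) (cutoff depth : Int)
    (visited frontier : List Int) (hne : frontier ≠ []) :
    Prod.Lex (· < ·) (· < ·)
      (bfsMB graph (bfsInner graph cutoff depth visited [] frontier).1
        (bfsInner graph cutoff depth visited [] frontier).2,
       (bfsInner graph cutoff depth visited [] frontier).2.length)
      (bfsMB graph visited frontier, frontier.length) := by
  rcases bfsInner_eq_or_visit graph cutoff depth frontier visited [] with h | ⟨x, hx, hxv, hxr⟩
  · rw [h]
    refine pvLexHelper ?_ ?_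
    · apply Finset.card_le_card
      intro y hy
      simp only [Finset.mem_sdiff, List.mem_toFinset, List.mem_append, List.not_mem_nil,
        false_or] at hy ⊢
      exact ⟨Or.inr hy.1, hy.2⟩
    · simpa using List.length_pos_iff.mpr hne
  · apply Prod.Lex.left
    apply Finset.card_lt_card
    rw [Finset.ssubset_def]
    constructor
    · intro y hy
      simp only [Finset.mem_sdiff, List.mem_toFinset, List.mem_append] at hy ⊢
      obtain ⟨hin, hnv⟩ := hy
      refine ⟨?_, fun hc => hnv (bfsInner_visited_subset graph cutoff depth frontier visited [] y hc)⟩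
      rcases hin with h | h
      · rcases bfsInner_next_subset graph cutoff depth frontier visited [] y h with h2 | h2
        · simp at h2
        · exact Or.inr h2
      · exact Or.inr h
    · intro hsub
      have hmem : x ∈ (frontier ++ bfsUniv graph).toFinset \ visited.toFinset := by
        simp only [Finset.mem_sdiff, List.mem_toFinset, List.mem_append]
        exact ⟨Or.inl hx, hxv⟩
      have h2 := hsub hmem
      simp only [Finset.mem_sdiff, List.mem_toFinset] at h2
      exact h2.2 hxr

def bfsLoopB (graph : List (Int × List Int)) (cutoff : Int)
    (visited frontier : List Int) (depth : Int) : List Int :=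
  if h : frontier = [] then visited
  else
    bfsLoopB graph cutoff
      (bfsInner graph cutoff depth visited [] frontier).1
      (bfsInner graph cutoff depth visited [] frontier).2 (depth + 1)
termination_by (bfsMB graph visited frontier, frontier.length)
decreasing_by
  exact bfsMB_step graph cutoff depth visited frontier h

def advanced_bfs_with_random_cutoffs_alt (graph : List (Int × List Int)) (start : Int) (cutoff : Int) : List Int :=
  bfsLoopB graph cutoff [] [start] 0

-- ===== PRECONDITION & SPEC =====
def Spec_advanced_bfs_with_random_cutoffs (graph : List (Int × List Int)) (start : Int) (cutoff : Int) (out : List Int) : Prop := out = advanced_bfs_with_random_cutoffs_alt graph start cutoff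
instance (graph : List (Int × List Int)) (start : Int) (cutoff : Int) (out : List Int) : Decidable (Spec_advanced_bfs_with_random_cutoffs graph start cutoff out) := by unfold Spec_advanced_bfs_with_random_cutoffs; infer_instance

-- ===== CLAIM (what is proved, stated in full; the proofs are below) =====
def Claim_equal_advanced_bfs_with_random_cutoffs : Prop := ∀ (graph : List (Int × List Int)) (start : Int) (cutoff : Int), Dom_advanced_bfs_with_random_cutoffs graph start cutoff → Spec_advanced_bfs_with_random_cutoffs graph start cutoff (advanced_bfs_with_random_cutoffs graph start cutoff)

-- ===== LEMMAS AND PROOFS =====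

-- one level of A's queue = the inner frontier pass of B
lemma bfsLoopA_level (graph : List (Int × List Int)) (cutoff : Int) (d : Int) :
    ∀ frontier visited next_frontier,
      bfsLoopA graph cutoff visited
        (frontier.map (fun n => (n, d)) ++ next_frontier.map (fun n => (n, d + 1)))
      = bfsLoopA graph cutoff (bfsInner graph cutoff d visited next_frontier frontier).1
          ((bfsInner graph cutoff d visited next_frontier frontier).2.map (fun n => (n, d + 1))) := by
  intro frontier
  induction frontier with
  | nil => intro v n; simp [bfsInner]
  | cons node rest ih =>
    intro v n
    rw [List.map_cons, List.cons_append, bfsLoopA, bfsInner]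
    by_cases h1 : node ∉ v
    · rw [if_pos h1, if_pos h1]
      by_cases h2 : d < cutoff
      · rw [if_pos h2, if_pos h2, List.append_assoc, ← List.map_append, ih]
      · rw [if_neg h2, if_neg h2, ih]
    · rw [if_neg h1, if_neg h1, ih]

lemma bfsLoopA_eq_loopB (graph : List (Int × List Int)) (cutoff : Int) :
    ∀ visited frontier d,
      bfsLoopA graph cutoff visited (frontier.map (fun n => (n, d)))
      = bfsLoopB graph cutoff visited frontier d := by
  intro visited frontier d
  fun_induction bfsLoopB graph cutoff visited frontier d with
  | case1 v d0 => simp [bfsLoopA]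
  | case2 v f d0 hf ih =>
    rw [← ih]
    simpa using bfsLoopA_level graph cutoff d0 f v []

-- ===== VERDICT (by name: the statement is the Claim_ definition above) =====
theorem advanced_bfs_with_random_cutoffs_spec : Claim_equal_advanced_bfs_with_random_cutoffs := by
  intro graph start cutoff _
  show advanced_bfs_with_random_cutoffs graph start cutoff = advanced_bfs_with_random_cutoffs_alt graph start cutoff
  rw [advanced_bfs_with_random_cutoffs, advanced_bfs_with_random_cutoffs_alt]
  have := bfsLoopA_eq_loopB graph cutoff [] [start] 0
  simpa using this
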